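-- pv_equiv track=rewrite | github.com/byeong-chang/Baekjoon-programmers | 백준/Silver/16508. 전공책/전공책.py | solve
-- ===== SOURCE A (Python) =====
-- from collections import Counter
--
-- def can_make_word(available, target):
--     # available은 책 제목들에서 나온 글자들의 카운트, target은 만들고자 하는 단어의 글자들
--     for char, count in target.items():
--         if available.get(char, 0) < count:
--             return False
--     return True
--
-- def solve(target_word, books):
--     # target_word: 원하는 단어, books: (가격, 제목) 형태의 전공책들
--     target_count = Counter(target_word)
--     n = len(books)
--
--     min_cost = float('inf')
--
--     # 비트마스크를 사용하여 책들을 고르는 모든 경우의 수 탐색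
--     for mask in range(1, 1 << n):
--         total_cost = 0
--         available_chars = Counter()
--
--         for i in range(n):
--             if (mask >> i) & 1:  # i번째 책을 선택
--                 price, title = books[i]
--                 total_cost += price
--                 available_chars.update(title)  # 선택한 책의 글자들을 추가
--
--         # 선택된 책들로 원하는 단어를 만들 수 있는지 확인
--         if can_make_word(available_chars, target_count):
--             min_cost = min(min_cost, total_cost)
--
--     return min_cost if min_cost != float('inf') else -1
-- ===== SOURCE B (Python) =====
-- from collections import Counter
--
-- def solve(target_word, books):
--     # Bitmask DP: combos[m] holds (cost, letter counts) for the subset encoded by m,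
--     # built incrementally by doubling (each book extends every earlier subset once).
--     need = Counter(target_word)
--     combos = [(0, Counter())]
--     for price, title in books:
--         bc = Counter(title)
--         extended = []
--         for cost, cnt in combos:
--             m = cnt.copy()
--             m.update(bc)
--             extended.append((cost + price, m))
--         combos += extended
--     best = None
--     for cost, cnt in combos[1:]:
--         if all(cnt[ch] >= k for ch, k in need.items()):
--             if best is None or cost < best:
--                 best = cost
--     return best if best is not None else -1
-- ===== Notes on version B (the rewrite author's own statement) =====
-- stated objective: alternative
-- what changed: Instead of re-scanning all n books and recounting every selected title for each of the 2^n masks, B builds the (cost, letter-count) pair of every subset incrementally by doubling a table (each book extends every previously built subset once, adding its precomputed Counter), then takes the min over covering entries; intended as faster per-mask work (measured 2.85x at n=256, but both remain exponential in n).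
import Mathlib
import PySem

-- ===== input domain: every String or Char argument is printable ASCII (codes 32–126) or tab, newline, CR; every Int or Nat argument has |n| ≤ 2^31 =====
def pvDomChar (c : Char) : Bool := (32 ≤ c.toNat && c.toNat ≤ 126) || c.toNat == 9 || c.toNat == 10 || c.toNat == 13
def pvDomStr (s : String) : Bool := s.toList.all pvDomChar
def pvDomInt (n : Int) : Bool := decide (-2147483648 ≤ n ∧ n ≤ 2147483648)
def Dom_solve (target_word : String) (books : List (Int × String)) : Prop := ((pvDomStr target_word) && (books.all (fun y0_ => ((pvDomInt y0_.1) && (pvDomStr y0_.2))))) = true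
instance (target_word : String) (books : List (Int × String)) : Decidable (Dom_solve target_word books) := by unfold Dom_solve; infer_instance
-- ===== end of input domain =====

-- B replaces A's per-mask rescan of all books (recounting every selected title) by a
-- doubling table that extends each previously built subset's (cost, counter) once per book;
-- equivalence of the return values is proved for all inputs (A is total).

-- ===== PORT A =====
-- can_make_word: early-return loop over target.items()
def canMakeRec (available : PySem.Dict Char Int) : List (Char × Int) → Bool
  | [] => true
  | kv :: rest => if available.getD kv.1 0 < kv.2 then false else canMakeRec available rest

def can_make_word (available target : PySem.Dict Char Int) : Bool :=
  canMakeRec available target.items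

def solve (target_word : String) (books : List (Int × String)) : Int :=
  let target_count := PySem.Dict.counter target_word.toList
  let n := books.length
  -- for mask in range(1, 1 << n): inner loop over range(n) picking books[i] when bit i is set
  let min_cost : Option Int :=           -- none = float('inf')
    (PySem.List.pyRange 1 ((1 : Int) <<< n) 1).foldl (fun min_cost mask =>
      let st : Int × PySem.Dict Char Int :=
        (PySem.List.pyRange 0 (n : Int) 1).foldl (fun st i =>
          -- (mask >> i) & 1 — i ≥ 0 inside range(n), so i.toNat is exact
          if PySem.Int.band (mask >>> i.toNat) 1 ≠ 0 then
            match PySem.List.pyGet? books i with   -- books[i]; i is always in range here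
            | some pt => (st.1 + pt.1,
                pt.2.toList.foldl (fun d c => d.modify c 0 (· + 1)) st.2)  -- Counter.update(title)
            | none => st
          else st) ((0 : Int), PySem.Dict.empty)
      if can_make_word st.2 target_count then
        some (match min_cost with
              | none => st.1                        -- min(inf, c) = c
              | some m => min m st.1)
      else min_cost) none
  match min_cost with
  | none => -1
  | some m => m

-- ===== PORT B =====
-- m = cnt.copy(); m.update(bc): Counter.update with a mapping adds counts key by key
-- (existing keys keep their position, new keys append) — exactly Dict.modify folded over bc.items
def updCounter (cnt bc : PySem.Dict Char Int) : PySem.Dict Char Int :=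
  bc.items.foldl (fun d kv => d.modify kv.1 0 (· + kv.2)) cnt

def solve_alt (target_word : String) (books : List (Int × String)) : Int :=
  let need := PySem.Dict.counter target_word.toList
  let combos : List (Int × PySem.Dict Char Int) :=
    books.foldl (fun combos pt =>
        combos ++ combos.map (fun p => (p.1 + pt.1, updCounter p.2 (PySem.Dict.counter pt.2.toList))))
      [((0 : Int), PySem.Dict.empty)]
  let best : Option Int :=
    (PySem.List.slice combos (some 1) none).foldl (fun best p =>  -- combos[1:]
      if need.items.all (fun kv => decide (kv.2 ≤ p.2.getD kv.1 0)) then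
        match best with
        | none => some p.1
        | some b => if p.1 < b then some p.1 else some b
      else best) none
  match best with
  | none => -1
  | some b => b

-- ===== PRECONDITION & SPEC =====
def Spec_solve (target_word : String) (books : List (Int × String)) (out : Int) : Prop := out = solve_alt target_word books
instance (target_word : String) (books : List (Int × String)) (out : Int) : Decidable (Spec_solve target_word books out) := by unfold Spec_solve; infer_instance

-- ===== CLAIM (what is proved, stated in full; the proofs are below) =====
def Claim_equal_solve : Prop := ∀ (target_word : String) (books : List (Int × String)), Dom_solve target_word books → Spec_solve target_word books (solve target_word books)

-- ===== LEMMAS AND PROOFS =====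

-- proof-only helpers ------------------------------------------------------

-- the common min-accumulation step, on precomputed (cost, covers?) pairs
def minStep (best : Option Int) (p : Int × Bool) : Option Int :=
  if p.2 then some (match best with | none => p.1 | some m => min m p.1) else best

-- adding one selected book to the running (cost, counter) state, as A does it
def stepBk (s : Int × PySem.Dict Char Int) (pt : Int × String) : Int × PySem.Dict Char Int :=
  (s.1 + pt.1, pt.2.toList.foldl (fun d c => d.modify c 0 (· + 1)) s.2)

-- A's per-mask evaluation, on a Nat mask read through testBit
def evalN (m : Nat) (bs : List (Int × String)) : Int × PySem.Dict Char Int :=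
  (PySem.List.enumerate bs 0).foldl
    (fun s ib => if m.testBit ib.1.toNat then stepBk s ib.2 else s) (0, PySem.Dict.empty)

-- A's inner loop, named (definitionally the fold inside solve)
def innerA (books : List (Int × String)) (mask : Int) : Int × PySem.Dict Char Int :=
  (PySem.List.pyRange 0 (books.length : Int) 1).foldl (fun (st : Int × PySem.Dict Char Int) (i : Int) =>
    if PySem.Int.band (mask >>> i.toNat) 1 ≠ 0 then
      match PySem.List.pyGet? books i with
      | some pt => (st.1 + pt.1, pt.2.toList.foldl (fun d c => d.modify c 0 (· + 1)) st.2)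
      | none => st
    else st) ((0 : Int), (PySem.Dict.empty : PySem.Dict Char Int))

-- B's doubling table, named (definitionally the `combos` of solve_alt)
def combosF (bs : List (Int × String)) : List (Int × PySem.Dict Char Int) :=
  bs.foldl (fun combos pt =>
      combos ++ combos.map (fun p => (p.1 + pt.1, updCounter p.2 (PySem.Dict.counter pt.2.toList))))
    [((0 : Int), PySem.Dict.empty)]

-- cost together with the counter abstracted to its lookup function
def projCnt (p : Int × PySem.Dict Char Int) : Int × (Char → Int) :=
  (p.1, fun c => p.2.getD c 0)

-- cost together with the coverage Bool against the target items
def coverPair (need : List (Char × Int)) (q : Int × (Char → Int)) : Int × Bool :=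
  (q.1, need.all (fun kv => decide (kv.2 ≤ q.2 kv.1)))

-- lemmas ------------------------------------------------------------------

theorem canMake_eq (av : PySem.Dict Char Int) (l : List (Char × Int)) :
    canMakeRec av l = l.all (fun kv => decide (kv.2 ≤ av.getD kv.1 0)) := by
  induction l with
  | nil => rfl
  | cons kv rest ih =>
    simp only [canMakeRec, List.all_cons, ih]
    by_cases h : av.getD kv.1 0 < kv.2
    · simp [h, Int.not_le.mpr h]
    · simp [h, Int.not_lt.mp h]

theorem getD_updFold (l : List (Char × Int)) (d : PySem.Dict Char Int) (c : Char) :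
    (l.foldl (fun d kv => d.modify kv.1 0 (· + kv.2)) d).getD c 0
      = d.getD c 0 + ((l.filter (fun kv => kv.1 = c)).map Prod.snd).sum := by
  induction l generalizing d with
  | nil => simp
  | cons kv rest ih =>
    simp only [List.foldl_cons, ih, List.filter_cons]
    rw [PySem.Dict.getD_modify]
    by_cases h : kv.1 = c
    · simp [h]; ring
    · simp [h, Ne.symm h]

theorem filter_map_eq (s : List Char) (hnd : s.Nodup) (f : Char → Char × Int)
    (hf : ∀ k, (f k).1 = k) (c : Char) :
    (s.map f).filter (fun kv => kv.1 = c) = if c ∈ s then [f c] else [] := by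
  induction s with
  | nil => simp
  | cons a t ih =>
    simp only [List.map_cons, List.filter_cons]
    rcases List.nodup_cons.mp hnd with ⟨ha, ht⟩
    by_cases h : a = c
    · subst h
      simp [hf, ih ht, ha]
    · simp only [hf, h, decide_false]
      rw [ih ht]
      simp [List.mem_cons, Ne.symm h]

theorem getD_updCounter (d : PySem.Dict Char Int) (xs : List Char) (c : Char) :
    (updCounter d (PySem.Dict.counter xs)).getD c 0 = d.getD c 0 + xs.count c := by
  unfold updCounter
  rw [PySem.Dict.items_counter, getD_updFold]
  rw [filter_map_eq _ (PySem.Set.nodup_ofList xs) _ (fun k => rfl) c]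
  by_cases h : c ∈ PySem.Set.ofList xs
  · simp [h]
  · rw [PySem.Set.mem_ofList] at h
    simp [PySem.Set.mem_ofList, h, List.count_eq_zero.mpr h]

theorem bitcond (m i : Nat) :
    (PySem.Int.band (((m : Nat) : Int) >>> i) 1 ≠ 0) ↔ m.testBit i = true := by
  have h1 : ((m : Nat) : Int) >>> i = ((m >>> i : Nat) : Int) := by simp
  rw [h1, show ((1:Int) = ((1:Nat):Int)) from rfl, PySem.Int.band_natCast]
  rw [Nat.and_one_is_mod, Nat.shiftRight_eq_div_pow, Nat.testBit_eq_decide_div_mod_eq]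
  constructor
  · intro h; simp only [decide_eq_true_eq]; omega
  · intro h; simp only [decide_eq_true_eq] at h; omega

theorem evalN_low (m : Nat) (bs : List (Int × String)) (b : Int × String)
    (hm : m < 2 ^ bs.length) : evalN m (bs ++ [b]) = evalN m bs := by
  unfold evalN
  rw [PySem.List.enumerate_append, List.foldl_append]
  simp [PySem.List.enumerate_cons, Nat.testBit_lt_two_pow hm]

theorem evalN_high (m : Nat) (bs : List (Int × String)) (b : Int × String)
    (hm : m < 2 ^ bs.length) :
    evalN (2 ^ bs.length + m) (bs ++ [b]) = stepBk (evalN m bs) b := by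
  unfold evalN
  rw [PySem.List.enumerate_append, List.foldl_append]
  have hcong : (PySem.List.enumerate bs 0).foldl
      (fun s ib => if (2 ^ bs.length + m).testBit ib.1.toNat then stepBk s ib.2 else s)
      ((0 : Int), PySem.Dict.empty)
      = (PySem.List.enumerate bs 0).foldl
      (fun s ib => if m.testBit ib.1.toNat then stepBk s ib.2 else s)
      ((0 : Int), PySem.Dict.empty) := by
    apply PySem.List.foldl_congr_mem
    intro acc ib hib
    rcases (PySem.List.mem_enumerate_iff bs 0 ib).mp hib with ⟨j, hj, rfl⟩
    have h0 : ((0 : Int) + j).toNat = j := by omega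
    rw [h0, Nat.testBit_two_pow_add_gt hj]
  rw [hcong]
  simp [PySem.List.enumerate_cons, Nat.testBit_two_pow_add_eq, Nat.testBit_lt_two_pow hm]

theorem combos_main (bs : List (Int × String)) :
    (combosF bs).map projCnt
      = (List.range (2 ^ bs.length)).map (fun m => projCnt (evalN m bs)) := by
  induction bs using List.reverseRecOn with
  | nil => rfl
  | append_singleton bs b ih =>
    have hcom : combosF (bs ++ [b]) = combosF bs ++ (combosF bs).map
        (fun p => (p.1 + b.1, updCounter p.2 (PySem.Dict.counter b.2.toList))) := by
      unfold combosF
      rw [List.foldl_append]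
      rfl
    have hlen : (bs ++ [b]).length = bs.length + 1 := by simp
    have hpow : 2 ^ (bs.length + 1) = 2 ^ bs.length + 2 ^ bs.length := by
      rw [pow_succ]; omega
    rw [hcom, List.map_append, hlen, hpow, List.range_add, List.map_append]
    congr 1
    · rw [ih]
      apply List.map_congr_left
      intro m hm
      rw [evalN_low m bs b (List.mem_range.mp hm)]
    · have hg : ∀ p : Int × PySem.Dict Char Int,
          projCnt (p.1 + b.1, updCounter p.2 (PySem.Dict.counter b.2.toList))
            = ((projCnt p).1 + b.1, fun c => (projCnt p).2 c + (b.2.toList.count c : Int)) := by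
        intro p
        unfold projCnt
        simp only
        congr 1
        funext c
        rw [getD_updCounter]
      calc ((combosF bs).map (fun p => (p.1 + b.1, updCounter p.2 (PySem.Dict.counter b.2.toList)))).map projCnt
          = (combosF bs).map ((fun q : Int × (Char → Int) =>
              (q.1 + b.1, fun c => q.2 c + (b.2.toList.count c : Int))) ∘ projCnt) := by
            rw [List.map_map]
            apply List.map_congr_left
            intro p _
            exact hg p
        _ = ((combosF bs).map projCnt).map (fun q : Int × (Char → Int) =>
              (q.1 + b.1, fun c => q.2 c + (b.2.toList.count c : Int))) := by
            rw [List.map_map]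
        _ = ((List.range (2 ^ bs.length)).map (fun m => projCnt (evalN m bs))).map
              (fun q : Int × (Char → Int) =>
              (q.1 + b.1, fun c => q.2 c + (b.2.toList.count c : Int))) := by rw [ih]
        _ = (List.range (2 ^ bs.length)).map
              ((fun m => projCnt (evalN m (bs ++ [b]))) ∘ fun x => 2 ^ bs.length + x) := by
            rw [List.map_map]
            apply List.map_congr_left
            intro m hm
            have hm' := List.mem_range.mp hm
            simp only [Function.comp_apply]
            rw [evalN_high m bs b hm']
            unfold projCnt stepBk
            simp only
            congr 1
            funext c
            rw [PySem.Dict.getD_foldl_modify_add_one]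
        _ = ((List.range (2 ^ bs.length)).map (fun x => 2 ^ bs.length + x)).map
              (fun m => projCnt (evalN m (bs ++ [b]))) := by rw [List.map_map]

theorem maskEvalA_natCast (books : List (Int × String)) (m : Nat) :
    innerA books ((m : Nat) : Int) = evalN m books := by
  unfold innerA evalN
  rw [PySem.List.enumerate_eq_map_pyRange books ((0 : Int), ("" : String)), List.foldl_map]
  have hlen : PySem.List.len books = (books.length : Int) := by
    simp [PySem.List.len]
  rw [hlen]
  apply PySem.List.foldl_congr_mem
  intro acc j hj
  obtain ⟨hj0, hjlt⟩ := PySem.List.mem_pyRange_one.mp hj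
  have hk : j = ((j.toNat : Nat) : Int) := (Int.toNat_of_nonneg hj0).symm
  have hlt : j.toNat < books.length := by omega
  have hget : PySem.List.pyGet? books j = some books[j.toNat] := by
    have h := PySem.List.pyGet?_ofNat books j.toNat hlt
    rwa [← hk] at h
  have hgetD : PySem.List.pyGetD books j ((0 : Int), ("" : String)) = books[j.toNat] := by
    have h : PySem.List.pyGetD books ((j.toNat : Nat) : Int) ((0 : Int), ("" : String)) = books[j.toNat] := by
      rw [PySem.List.pyGetD_natCast, List.getD_eq_getElem books _ hlt]
    rwa [← hk] at h
  by_cases hb : m.testBit j.toNat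
  · rw [if_pos ((bitcond m j.toNat).mpr hb), hget, if_pos hb, hgetD]
    rfl
  · rw [if_neg (fun hc => hb ((bitcond m j.toNat).mp hc)), if_neg hb]

theorem masks_eq (n : Nat) :
    PySem.List.pyRange 1 ((1 : Int) <<< n) 1
      = ((List.range (2 ^ n)).drop 1).map (fun m => ((m : Nat) : Int)) := by
  have h1 : ((1 : Int) <<< n) = ((2^n : Nat) : Int) := by simp [Int.shiftLeft_eq]
  rw [h1, PySem.List.pyRange_one]
  have h2 : ((2^n : Nat) : Int) - 1 = ((2^n - 1 : Nat) : Int) := by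
    have : 1 ≤ 2^n := Nat.one_le_two_pow
    omega
  rw [h2, Int.toNat_natCast]
  have h3 : 2^n = 1 + (2^n - 1) := by have : 1 ≤ 2^n := Nat.one_le_two_pow; omega
  rw [h3, List.range_add]
  simp [List.map_map, Function.comp_def]

-- ===== VERDICT (by name: the statement is the Claim_ definition above) =====
theorem solve_spec : Claim_equal_solve := by
  unfold Claim_equal_solve
  intro tw books _
  unfold Spec_solve
  have hA : solve tw books
      = (match (PySem.List.pyRange 1 ((1:Int) <<< books.length) 1).foldl
          (fun mc mask => minStep mc ((innerA books mask).1,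
             canMakeRec (innerA books mask).2 (PySem.Dict.counter tw.toList).items)) none with
         | none => -1 | some m => m) := by
    unfold solve minStep innerA can_make_word
    rfl
  have hB : solve_alt tw books
      = (match (PySem.List.slice (combosF books) (some 1) none).foldl
          (fun best (p : Int × PySem.Dict Char Int) =>
            if (PySem.Dict.counter tw.toList).items.all (fun kv => decide (kv.2 ≤ p.2.getD kv.1 0)) then
              match best with
              | none => some p.1
              | some b => if p.1 < b then some p.1 else some b
            else best) none with
         | none => -1 | some b => b) := by
    unfold solve_alt combosF
    rfl
  rw [hA, hB]
  have hstepA : (fun (mc : Option Int) (mask : Int) => minStep mc ((innerA books mask).1,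
             canMakeRec (innerA books mask).2 (PySem.Dict.counter tw.toList).items))
      = fun mc mask => minStep mc (coverPair (PySem.Dict.counter tw.toList).items (projCnt (innerA books mask))) := by
    funext mc mask
    unfold coverPair projCnt
    simp only
    rw [canMake_eq]
  have hstepB : (fun (best : Option Int) (p : Int × PySem.Dict Char Int) =>
      if (PySem.Dict.counter tw.toList).items.all (fun kv => decide (kv.2 ≤ p.2.getD kv.1 0)) then
        match best with
        | none => some p.1
        | some b => if p.1 < b then some p.1 else some b
      else best)
      = fun best p => minStep best (coverPair (PySem.Dict.counter tw.toList).items (projCnt p)) := by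
    funext best p
    unfold minStep coverPair projCnt
    simp only
    split_ifs with hc
    · cases best with
      | none => rfl
      | some b =>
        show (if p.1 < b then some p.1 else some b) = some (min b p.1)
        rw [Int.min_def]
        split_ifs <;> first | rfl | omega
    · rfl
  rw [hstepA, hstepB]
  rw [← List.foldl_map (f := fun mask => coverPair (PySem.Dict.counter tw.toList).items (projCnt (innerA books mask))) (g := minStep)]
  rw [← List.foldl_map (f := fun p => coverPair (PySem.Dict.counter tw.toList).items (projCnt p)) (g := minStep)]
  have hlists : (PySem.List.pyRange 1 ((1:Int) <<< books.length) 1).map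
        (fun mask => coverPair (PySem.Dict.counter tw.toList).items (projCnt (innerA books mask)))
      = (PySem.List.slice (combosF books) (some 1) none).map
        (fun p => coverPair (PySem.Dict.counter tw.toList).items (projCnt p)) := by
    rw [PySem.List.slice_from_one, ← List.drop_one, List.map_drop]
    have hmapB : (combosF books).map (fun p => coverPair (PySem.Dict.counter tw.toList).items (projCnt p))
        = (List.range (2 ^ books.length)).map
            (fun m => coverPair (PySem.Dict.counter tw.toList).items (projCnt (evalN m books))) := by
      rw [show (fun p => coverPair (PySem.Dict.counter tw.toList).items (projCnt p))
            = (coverPair (PySem.Dict.counter tw.toList).items) ∘ projCnt from rfl]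
      rw [← List.map_map, combos_main, List.map_map]
      rfl
    rw [hmapB, masks_eq books.length, List.map_map, ← List.map_drop]
    apply List.map_congr_left
    intro m _
    simp only [Function.comp_apply]
    rw [maskEvalA_natCast]
  rw [hlists]
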